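-- pv_equiv track=rewrite | github.com/cjcolman/advent_of_code | 2015/Connor/3/3.py | get_list_of_visits
-- ===== SOURCE A (Python) =====
-- def get_list_of_visits(directions):
--     current_x, current_y = 0, 0
--     all_visits = [(current_x, current_y)]
--     for direction in directions:
--         current_x += {"<":-1, ">":1, "^":0, "v":0}[direction]
--         current_y += {"<":0, ">":0, "^":1, "v":-1}[direction]
--         all_visits.append((current_x, current_y))
--     return all_visits
-- ===== SOURCE B (Python) =====
-- def get_list_of_visits(directions):
--     def prefix_sums(deltas):
--         total, sums = 0, [0]
--         for d in deltas:
--             total += d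
--             sums.append(total)
--         return sums
--     xs = prefix_sums([{"<": -1, ">": 1, "^": 0, "v": 0}[c] for c in directions])
--     ys = prefix_sums([{"<": 0, ">": 0, "^": 1, "v": -1}[c] for c in directions])
--     return list(zip(xs, ys))
-- ===== Notes on version B (the rewrite author's own statement) =====
-- stated objective: alternative
-- what changed: Instead of one loop threading a (x,y) pair and appending to one list, B computes the x- and y-coordinate tracks as two independent prefix-sum lists (after mapping each direction to its delta) and zips them together.
import Mathlib
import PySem

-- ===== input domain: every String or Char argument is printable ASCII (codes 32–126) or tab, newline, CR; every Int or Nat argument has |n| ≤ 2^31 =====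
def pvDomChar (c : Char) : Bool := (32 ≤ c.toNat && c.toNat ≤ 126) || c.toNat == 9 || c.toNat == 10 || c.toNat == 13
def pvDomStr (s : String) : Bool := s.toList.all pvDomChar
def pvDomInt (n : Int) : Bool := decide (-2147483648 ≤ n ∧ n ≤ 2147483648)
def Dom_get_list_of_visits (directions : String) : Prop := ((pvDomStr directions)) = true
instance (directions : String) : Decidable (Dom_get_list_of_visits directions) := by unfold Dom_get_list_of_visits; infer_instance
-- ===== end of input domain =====

-- B changes the decomposition: two independent per-axis prefix-sum passes zipped together, instead of A's single loop threading (x,y).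

-- ===== PORT A =====
-- A: one loop over the characters, updating current_x/current_y and appending to all_visits.
-- (the dict lookups raise KeyError on a char outside "<>^v"; Pre_ excludes those inputs)
def get_list_of_visits (directions : String) : List (Int × Int) :=
  (directions.toList.foldl
    (fun (st : Int × Int × List (Int × Int)) d =>
      let x := st.1 + (if d = '<' then -1 else if d = '>' then 1 else 0)
      let y := st.2.1 + (if d = '^' then 1 else if d = 'v' then -1 else 0)
      (x, y, st.2.2 ++ [(x, y)]))
    (0, 0, [((0 : Int), (0 : Int))])).2.2

-- ===== PORT B =====
-- B: map each char to its per-axis delta, take prefix sums of each axis independently, zip.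
def pvPrefixSums (deltas : List Int) : List Int :=
  (deltas.foldl (fun (st : Int × List Int) d => (st.1 + d, st.2 ++ [st.1 + d])) (0, [(0 : Int)])).2

def get_list_of_visits_alt (directions : String) : List (Int × Int) :=
  let xs := pvPrefixSums (directions.toList.map (fun c => if c = '<' then -1 else if c = '>' then 1 else 0))
  let ys := pvPrefixSums (directions.toList.map (fun c => if c = '^' then 1 else if c = 'v' then -1 else 0))
  xs.zip ys

-- ===== PRECONDITION & SPEC =====
-- Pre_ excludes exactly the inputs on which the Python A raises KeyError (a char outside "<>^v"); B raises KeyError there too.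
def Pre_get_list_of_visits (directions : String) : Prop :=
  (directions.toList.all (fun c => c == '<' || c == '>' || c == '^' || c == 'v')) = true
instance (directions : String) : Decidable (Pre_get_list_of_visits directions) := by unfold Pre_get_list_of_visits; infer_instance
def pvWitness_get_list_of_visits : String := "><^v<"

def Spec_get_list_of_visits (directions : String) (out : List (Int × Int)) : Prop := out = get_list_of_visits_alt directions
instance (directions : String) (out : List (Int × Int)) : Decidable (Spec_get_list_of_visits directions out) := by unfold Spec_get_list_of_visits; infer_instance

-- ===== CLAIM (what is proved, stated in full; the proofs are below) =====
def Claim_equal_get_list_of_visits : Prop := ∀ (directions : String), Dom_get_list_of_visits directions → Pre_get_list_of_visits directions → Spec_get_list_of_visits directions (get_list_of_visits directions)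

-- ===== LEMMAS AND PROOFS =====

def pvDx (c : Char) : Int := if c = '<' then -1 else if c = '>' then 1 else 0
def pvDy (c : Char) : Int := if c = '^' then 1 else if c = 'v' then -1 else 0

-- the walk from (x,y) along l, positions after each step
def pvWalk (x y : Int) : List Char → List (Int × Int)
  | [] => []
  | c :: cs => (x + pvDx c, y + pvDy c) :: pvWalk (x + pvDx c) (y + pvDy c) cs

def pvPS (t : Int) : List Int → List Int
  | [] => []
  | d :: ds => (t + d) :: pvPS (t + d) ds

theorem foldA_eq (l : List Char) : ∀ (x y : Int) (acc : List (Int × Int)),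
    (l.foldl
      (fun (st : Int × Int × List (Int × Int)) d =>
        let px := st.1 + pvDx d
        let py := st.2.1 + pvDy d
        (px, py, st.2.2 ++ [(px, py)]))
      (x, y, acc)).2.2 = acc ++ pvWalk x y l := by
  induction l with
  | nil => intro x y acc; simp [pvWalk]
  | cons c cs ih => intro x y acc; simp [pvWalk, ih, List.append_assoc]

theorem foldPS_eq (l : List Int) : ∀ (t : Int) (acc : List Int),
    (l.foldl (fun (st : Int × List Int) d => (st.1 + d, st.2 ++ [st.1 + d])) (t, acc)).2
      = acc ++ pvPS t l := by
  induction l with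
  | nil => intro t acc; simp [pvPS]
  | cons d ds ih => intro t acc; simp [pvPS, ih, List.append_assoc]

theorem zip_pvPS (l : List Char) : ∀ (x y : Int),
    (pvPS x (l.map pvDx)).zip (pvPS y (l.map pvDy)) = pvWalk x y l := by
  induction l with
  | nil => intro x y; simp [pvPS, pvWalk]
  | cons c cs ih => intro x y; simp [pvPS, pvWalk, ih]

-- ===== VERDICT (by name: the statement is the Claim_ definition above) =====
theorem pvDx_def : pvDx = fun c => if c = '<' then (-1 : Int) else if c = '>' then 1 else 0 := rfl
theorem pvDy_def : pvDy = fun c => if c = '^' then (1 : Int) else if c = 'v' then -1 else 0 := rfl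

theorem get_list_of_visits_spec : Claim_equal_get_list_of_visits := by
  intro directions _ _
  unfold Spec_get_list_of_visits get_list_of_visits get_list_of_visits_alt pvPrefixSums
  have hA := foldA_eq directions.toList 0 0 [((0:Int),(0:Int))]
  have hx := foldPS_eq (directions.toList.map pvDx) 0 [(0:Int)]
  have hy := foldPS_eq (directions.toList.map pvDy) 0 [(0:Int)]
  have hz := zip_pvPS directions.toList 0 0
  simp only [pvDx, pvDy] at hA
  rw [pvDx_def] at hx hz
  rw [pvDy_def] at hy hz
  simp [hA, hx, hy, hz]
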